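-- pv_equiv track=rewrite | github.com/llgeek/leetcode | StringPalindromeSplit/solution1.py | getPalindromeStrings
-- ===== SOURCE A (Python) =====
-- def getPalindromeStrings(s, P, i, j):
--     result = []
--     if P[i][j] == -1:
--         return [s[i:j+1]]
--     else:
--         result.extend(getPalindromeStrings(s, P, i, P[i][j]))
--         result.extend(getPalindromeStrings(s, P, P[i][j]+1, j))
--         return result
-- ===== SOURCE B (Python) =====
-- def getPalindromeStrings(s, P, i, j):
--     # Two staged passes: first collect the leaf index ranges with an explicit
--     # stack (left child pushed first, so leaves come out right-to-left),
--     # then slice the string once over the reversed range list.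
--     leaves = []
--     stack = [(i, j)]
--     while stack:
--         a, b = stack.pop()
--         k = P[a][b]
--         if k == -1:
--             leaves.append((a, b))
--         else:
--             stack.append((a, k))       # left pushed first,
--             stack.append((k + 1, b))   # right popped and visited first
--     return [s[a:b + 1] for a, b in reversed(leaves)]
-- ===== Notes on version B (the rewrite author's own statement) =====
-- stated objective: alternative
-- what changed: Replaces the recursive tree descent with two staged passes: an iterative explicit-stack traversal that visits the split tree right-to-left and collects leaf index ranges, then one comprehension that slices the string over the reversed range list.
-- outside the precondition, e.g. on getPalindromeStrings('ab', [[-1, 0], [-1, -1], [9]], 0, 1): A returns ['a', 'b'], B returns ['a', 'b']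
import Mathlib
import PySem

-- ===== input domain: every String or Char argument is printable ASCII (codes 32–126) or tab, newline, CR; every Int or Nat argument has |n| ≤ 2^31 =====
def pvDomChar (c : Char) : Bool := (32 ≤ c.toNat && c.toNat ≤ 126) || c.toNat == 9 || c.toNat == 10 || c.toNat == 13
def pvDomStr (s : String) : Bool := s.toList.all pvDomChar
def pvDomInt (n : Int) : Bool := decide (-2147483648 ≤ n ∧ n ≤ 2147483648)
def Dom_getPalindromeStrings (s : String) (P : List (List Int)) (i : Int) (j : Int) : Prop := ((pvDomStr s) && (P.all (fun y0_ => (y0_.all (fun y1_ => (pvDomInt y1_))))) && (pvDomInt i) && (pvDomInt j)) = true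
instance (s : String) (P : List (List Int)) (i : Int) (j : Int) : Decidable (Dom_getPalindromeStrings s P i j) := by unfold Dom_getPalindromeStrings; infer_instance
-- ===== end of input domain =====

-- B replaces A's recursive descent by two staged passes: a stack loop collecting leaf ranges
-- right-to-left, then one slicing pass over the reversed range list (same return value; no speed claim).

-- P[a][b] as Python computes it (negative indices from the end; none = IndexError)
def pvCell (P : List (List Int)) (a b : Int) : Option Int :=
  (PySem.List.pyGet? P a).bind (fun row => PySem.List.pyGet? row b)

-- ===== PORT A =====
-- fuel makes the recursion total; under Pre_ it is always sufficient, and a none lookup never occurs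
def pvGoA (s : String) (P : List (List Int)) : Nat → Int → Int → List String
  | 0, _, _ => []
  | f + 1, i, j =>
    match pvCell P i j with
    | none => []
    | some k =>
      if k = -1 then [PySem.Str.slice s (some i) (some (j + 1))]
      else pvGoA s P f i k ++ pvGoA s P f (k + 1) j

def getPalindromeStrings (s : String) (P : List (List Int)) (i : Int) (j : Int) : List String :=
  pvGoA s P ((j - i + 1).toNat + 1) i j

-- ===== PORT B =====
-- pass 1: the while-loop over the explicit stack, collecting leaf ranges (fuel never runs out under Pre_)
def pvCollect (P : List (List Int)) : Nat → List (Int × Int) → List (Int × Int) → List (Int × Int)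
  | 0, _, leaves => leaves
  | _ + 1, [], leaves => leaves
  | f + 1, (a, b) :: stack, leaves =>
    match pvCell P a b with
    | none => leaves
    | some k =>
      if k = -1 then pvCollect P f stack (leaves ++ [(a, b)])
      else pvCollect P f ((k + 1, b) :: (a, k) :: stack) leaves

-- pass 2: slice over the reversed leaf list
def getPalindromeStrings_alt (s : String) (P : List (List Int)) (i : Int) (j : Int) : List String :=
  ((pvCollect P (2 * (j - i + 1).toNat + 1) [(i, j)] []).reverse).map
    (fun p => PySem.Str.slice s (some p.1) (some (p.2 + 1)))

-- ===== PRECONDITION & SPEC =====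
-- total in-range lookup used only by the precondition (inside Pre_ it coincides with pvCell)
def pvCellN (P : List (List Int)) (a b : Nat) : Int := (P.getD a []).getD b 0

-- the valid-table triangle condition: square table, 0 ≤ i ≤ j < len(P), and every split entry in the
-- triangle [i,j] is -1 or strictly inside its range (what a precomputed palindrome-split table guarantees)
def pvTri (P : List (List Int)) (i : Int) (j : Int) : Prop :=
  0 ≤ i ∧ i ≤ j ∧ j < (P.length : Int) ∧
  (∀ row ∈ P, row.length = P.length) ∧
  (∀ a ∈ List.range P.length, ∀ b ∈ List.range P.length,
    i ≤ (a : Int) → a ≤ b → (b : Int) ≤ j →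
    pvCellN P a b = -1 ∨ ((a : Int) ≤ pvCellN P a b ∧ pvCellN P a b < (b : Int)))

-- Pre_ covers the immediate-leaf case (the addressed cell exists and holds -1: the call returns one slice,
-- whatever i and j are) and the natural domain of the reconstruction (a valid split table with 0 ≤ i ≤ j,
-- on which A's recursion is well-founded); it excludes deeper recursions through malformed tables or
-- wrapped/out-of-range index pairs, where A's termination and values are accidental (where both programs
-- do return there, they agree).
def Pre_getPalindromeStrings (s : String) (P : List (List Int)) (i : Int) (j : Int) : Prop :=
  pvCell P i j = some (-1) ∨ pvTri P i j
instance (s : String) (P : List (List Int)) (i : Int) (j : Int) : Decidable (Pre_getPalindromeStrings s P i j) := by unfold Pre_getPalindromeStrings pvTri; infer_instance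

def pvWitness_getPalindromeStrings : String × List (List Int) × Int × Int :=
  ("ab", [[-1, 0], [-1, -1]], 0, 1)

def Spec_getPalindromeStrings (s : String) (P : List (List Int)) (i : Int) (j : Int) (out : List String) : Prop := out = getPalindromeStrings_alt s P i j
instance (s : String) (P : List (List Int)) (i : Int) (j : Int) (out : List String) : Decidable (Spec_getPalindromeStrings s P i j out) := by unfold Spec_getPalindromeStrings; infer_instance

-- ===== CLAIM (what is proved, stated in full; the proofs are below) =====
def Claim_equal_getPalindromeStrings : Prop := ∀ (s : String) (P : List (List Int)) (i : Int) (j : Int), Dom_getPalindromeStrings s P i j → Pre_getPalindromeStrings s P i j → Spec_getPalindromeStrings s P i j (getPalindromeStrings s P i j)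

-- ===== LEMMAS AND PROOFS =====

-- canonical result of A with exactly enough fuel
def pvRes (s : String) (P : List (List Int)) (i j : Int) : List String :=
  pvGoA s P ((j - i).toNat + 1) i j

-- the leaf ranges of the split tree, left to right (proof-side mirror of A's recursion over ranges)
def pvLv (P : List (List Int)) : Nat → Int → Int → List (Int × Int)
  | 0, _, _ => []
  | f + 1, i, j =>
    match pvCell P i j with
    | none => []
    | some k =>
      if k = -1 then [(i, j)]
      else pvLv P f i k ++ pvLv P f (k + 1) j

def pvLvRes (P : List (List Int)) (i j : Int) : List (Int × Int) :=
  pvLv P ((j - i).toNat + 1) i j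

lemma pvCell_eq (P : List (List Int)) (i j : Int)
    (hi : 0 ≤ i) (hij : i ≤ j) (hj : j < (P.length : Int))
    (hrows : ∀ row ∈ P, row.length = P.length) :
    pvCell P i j = some (pvCellN P i.toNat j.toNat) := by
  have hiN : i.toNat < P.length := by omega
  have hrow := hrows P[i.toNat] (List.getElem_mem hiN)
  have hjN : j.toNat < P[i.toNat].length := by omega
  rw [pvCell, PySem.List.pyGet?_eq_some_getElem P hi (by omega), Option.bind_some,
    PySem.List.pyGet?_eq_some_getElem P[i.toNat] (by omega) (by omega)]
  rw [pvCellN, List.getD_eq_getElem P [] hiN, List.getD_eq_getElem _ 0 hjN]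

lemma pre_sub (P : List (List Int)) (i j k : Int)
    (h : pvTri P i j)
    (hk : pvCellN P i.toNat j.toNat = k) (hne : k ≠ -1) :
    (i ≤ k ∧ k < j) ∧ pvTri P i k ∧ pvTri P (k + 1) j := by
  obtain ⟨hi, hij, hj, hrows, htri⟩ := h
  have hmemi : i.toNat ∈ List.range P.length := by simp only [List.mem_range]; omega
  have hmemj : j.toNat ∈ List.range P.length := by simp only [List.mem_range]; omega
  have h0 := htri i.toNat hmemi j.toNat hmemj (by omega) (by omega) (by omega)
  rw [hk] at h0
  have hik : i ≤ k ∧ k < j := by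
    rcases h0 with h | h
    · exact absurd h hne
    · constructor <;> omega
  refine ⟨hik, ⟨hi, hik.1, by omega, hrows, ?_⟩, ⟨by omega, by omega, hj, hrows, ?_⟩⟩
  · intro a ha b hb h1 h2 h3
    exact htri a ha b hb h1 h2 (by omega)
  · intro a ha b hb h1 h2 h3
    exact htri a ha b hb (by omega) h2 h3

lemma goA_eq_res (s : String) (P : List (List Int)) :
    ∀ d i j f, pvTri P i j → (j - i).toNat = d → d < f →
      pvGoA s P f i j = pvRes s P i j := by
  intro d
  induction d using Nat.strong_induction_on with
  | _ d ih =>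
    intro i j f hpre hd hf
    cases f with
    | zero => omega
    | succ f =>
      obtain ⟨hi, hij, hj, hrows, htri⟩ := hpre
      have hpre' : pvTri P i j := ⟨hi, hij, hj, hrows, htri⟩
      have hcell := pvCell_eq P i j hi hij hj hrows
      rw [pvRes, hd]
      simp only [pvGoA, hcell]
      by_cases hk : pvCellN P i.toNat j.toNat = -1
      · simp [hk]
      · simp only [if_neg hk]
        obtain ⟨⟨h1, h2⟩, hpl, hpr⟩ := pre_sub P i j _ hpre' rfl hk
        have dl : (pvCellN P i.toNat j.toNat - i).toNat < d := by omega
        have dr : (j - (pvCellN P i.toNat j.toNat + 1)).toNat < d := by omega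
        rw [ih _ dl i _ f hpl rfl (by omega), ih _ dl i _ d hpl rfl (by omega),
            ih _ dr _ j f hpr rfl (by omega), ih _ dr _ j d hpr rfl (by omega)]

lemma lv_eq_res (P : List (List Int)) :
    ∀ d i j f, pvTri P i j → (j - i).toNat = d → d < f →
      pvLv P f i j = pvLvRes P i j := by
  intro d
  induction d using Nat.strong_induction_on with
  | _ d ih =>
    intro i j f hpre hd hf
    cases f with
    | zero => omega
    | succ f =>
      obtain ⟨hi, hij, hj, hrows, htri⟩ := hpre
      have hpre' : pvTri P i j := ⟨hi, hij, hj, hrows, htri⟩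
      have hcell := pvCell_eq P i j hi hij hj hrows
      rw [pvLvRes, hd]
      simp only [pvLv, hcell]
      by_cases hk : pvCellN P i.toNat j.toNat = -1
      · simp [hk]
      · simp only [if_neg hk]
        obtain ⟨⟨h1, h2⟩, hpl, hpr⟩ := pre_sub P i j _ hpre' rfl hk
        have dl : (pvCellN P i.toNat j.toNat - i).toNat < d := by omega
        have dr : (j - (pvCellN P i.toNat j.toNat + 1)).toNat < d := by omega
        rw [ih _ dl i _ f hpl rfl (by omega), ih _ dl i _ d hpl rfl (by omega),
            ih _ dr _ j f hpr rfl (by omega), ih _ dr _ j d hpr rfl (by omega)]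

-- A's result is exactly the slices of the leaf-range list
lemma res_eq_map (s : String) (P : List (List Int)) :
    ∀ d i j, pvTri P i j → (j - i).toNat = d →
      pvRes s P i j = (pvLvRes P i j).map (fun p => PySem.Str.slice s (some p.1) (some (p.2 + 1))) := by
  intro d
  induction d using Nat.strong_induction_on with
  | _ d ih =>
    intro i j hpre hd
    obtain ⟨hi, hij, hj, hrows, htri⟩ := hpre
    have hpre' : pvTri P i j := ⟨hi, hij, hj, hrows, htri⟩
    have hcell := pvCell_eq P i j hi hij hj hrows
    rw [pvRes, pvLvRes, hd]
    simp only [pvGoA, pvLv, hcell]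
    by_cases hk : pvCellN P i.toNat j.toNat = -1
    · simp [hk]
    · simp only [if_neg hk]
      obtain ⟨⟨h1, h2⟩, hpl, hpr⟩ := pre_sub P i j _ hpre' rfl hk
      have dl : (pvCellN P i.toNat j.toNat - i).toNat < d := by omega
      have dr : (j - (pvCellN P i.toNat j.toNat + 1)).toNat < d := by omega
      rw [goA_eq_res s P _ i _ d hpl rfl (by omega), goA_eq_res s P _ _ j d hpr rfl (by omega),
          lv_eq_res P _ i _ d hpl rfl (by omega), lv_eq_res P _ _ j d hpr rfl (by omega),
          ih _ dl i _ hpl rfl, ih _ dr _ j hpr rfl, List.map_append]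

lemma lv_len (P : List (List Int)) :
    ∀ d i j, pvTri P i j → (j - i).toNat = d →
      1 ≤ (pvLvRes P i j).length ∧ (pvLvRes P i j).length ≤ d + 1 := by
  intro d
  induction d using Nat.strong_induction_on with
  | _ d ih =>
    intro i j hpre hd
    obtain ⟨hi, hij, hj, hrows, htri⟩ := hpre
    have hpre' : pvTri P i j := ⟨hi, hij, hj, hrows, htri⟩
    have hcell := pvCell_eq P i j hi hij hj hrows
    rw [pvLvRes, hd]
    simp only [pvLv, hcell]
    by_cases hk : pvCellN P i.toNat j.toNat = -1
    · simp [hk]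
    · simp only [if_neg hk]
      obtain ⟨⟨h1, h2⟩, hpl, hpr⟩ := pre_sub P i j _ hpre' rfl hk
      have dl : (pvCellN P i.toNat j.toNat - i).toNat < d := by omega
      have dr : (j - (pvCellN P i.toNat j.toNat + 1)).toNat < d := by omega
      rw [lv_eq_res P _ i _ d hpl rfl (by omega), lv_eq_res P _ _ j d hpr rfl (by omega)]
      have Hl := ih _ dl i _ hpl rfl
      have Hr := ih _ dr _ j hpr rfl
      rw [List.length_append]
      constructor <;> omega

-- the stack loop processes one pushed range into the reverse of its leaf-range list
lemma collect_step (P : List (List Int)) :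
    ∀ d i j, pvTri P i j → (j - i).toNat = d →
      ∀ st acc f, pvCollect P ((2 * (pvLvRes P i j).length - 1) + f) ((i, j) :: st) acc
        = pvCollect P f st (acc ++ (pvLvRes P i j).reverse) := by
  intro d
  induction d using Nat.strong_induction_on with
  | _ d ih =>
    intro i j hpre hd st acc f
    obtain ⟨hi, hij, hj, hrows, htri⟩ := hpre
    have hpre' : pvTri P i j := ⟨hi, hij, hj, hrows, htri⟩
    have hcell := pvCell_eq P i j hi hij hj hrows
    by_cases hk : pvCellN P i.toNat j.toNat = -1
    · have hres : pvLvRes P i j = [(i, j)] := by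
        rw [pvLvRes]; simp only [pvLv, hcell]; rw [if_pos hk]
      rw [hres]
      have hfu : 2 * ([(i, j)] : List (Int × Int)).length - 1 + f = f + 1 := by
        simp only [List.length_cons, List.length_nil]; omega
      rw [hfu]
      simp only [pvCollect, hcell]
      rw [if_pos hk]
      simp
    · obtain ⟨⟨h1, h2⟩, hpl, hpr⟩ := pre_sub P i j _ hpre' rfl hk
      have dl : (pvCellN P i.toNat j.toNat - i).toNat < d := by omega
      have dr : (j - (pvCellN P i.toNat j.toNat + 1)).toNat < d := by omega
      have hres : pvLvRes P i j
          = pvLvRes P i (pvCellN P i.toNat j.toNat) ++ pvLvRes P (pvCellN P i.toNat j.toNat + 1) j := by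
        rw [pvLvRes, hd]
        simp only [pvLv, hcell]
        rw [if_neg hk, lv_eq_res P _ i _ d hpl rfl (by omega),
            lv_eq_res P _ _ j d hpr rfl (by omega)]
      have hLl := (lv_len P _ i _ hpl rfl).1
      have hLr := (lv_len P _ _ j hpr rfl).1
      have key : 2 * (pvLvRes P i j).length - 1 + f
          = (2 * (pvLvRes P (pvCellN P i.toNat j.toNat + 1) j).length - 1
             + (2 * (pvLvRes P i (pvCellN P i.toNat j.toNat)).length - 1 + f)) + 1 := by
        rw [hres, List.length_append]; omega
      rw [key]
      simp only [pvCollect, hcell]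
      rw [if_neg hk, ih _ dr _ j hpr rfl, ih _ dl i _ hpl rfl, hres, List.reverse_append,
          List.append_assoc]

lemma collect_nil (P : List (List Int)) (f : Nat) (acc : List (Int × Int)) :
    pvCollect P f [] acc = acc := by
  cases f <;> rfl

-- ===== VERDICT (by name: the statement is the Claim_ definition above) =====
theorem getPalindromeStrings_spec : Claim_equal_getPalindromeStrings := by
  intro s P i j _hdom hpre
  unfold Spec_getPalindromeStrings
  rcases hpre with hleaf | hpre
  · rw [getPalindromeStrings, getPalindromeStrings_alt]
    simp only [pvGoA, pvCollect, hleaf, if_true, collect_nil, List.nil_append,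
      List.reverse_cons, List.reverse_nil, List.map]
  · obtain ⟨hi, hij, hj, hrows, htri⟩ := hpre
    have hpre' : pvTri P i j := ⟨hi, hij, hj, hrows, htri⟩
    have hA : getPalindromeStrings s P i j = pvRes s P i j := by
      rw [getPalindromeStrings]
      exact goA_eq_res s P (j - i).toNat i j _ hpre' rfl (by omega)
    have L1 := lv_len P (j - i).toNat i j hpre' rfl
    have hfu : 2 * (j - i + 1).toNat + 1
        = (2 * (pvLvRes P i j).length - 1)
          + (2 * (j - i + 1).toNat + 1 - (2 * (pvLvRes P i j).length - 1)) := by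
      omega
    rw [hA, getPalindromeStrings_alt, hfu, collect_step P (j - i).toNat i j hpre' rfl,
        collect_nil, List.nil_append, List.reverse_reverse,
        res_eq_map s P (j - i).toNat i j hpre' rfl]
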